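-- pv_equiv track=rewrite | github.com/David-Schmidt02/microservicio-clips | transcripciones_handler.py | _agrupar_por_canal
-- ===== SOURCE A (Python) =====
-- def _agrupar_por_canal(hits):
--     canales = {}
--     hits_filtrados = []
--     for hit in hits:
--         src = hit.get("_source", {})
--         canal = src.get("slug", "")
--         if canal not in canales:
--             canales[canal] = []
--         if len(canales[canal]) < 10:
--             canales[canal].append(hit)
--     for lista in canales.values():
--         hits_filtrados.extend(lista)
--     return hits_filtrados
-- ===== SOURCE B (Python) =====
-- def _agrupar_por_canal(hits):
--     def _slug(hit):
--         return hit.get("_source", {}).get("slug", "")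
--     orden = []
--     for hit in hits:
--         c = _slug(hit)
--         if c not in orden:
--             orden.append(c)
--     return [h for c in orden for h in [x for x in hits if _slug(x) == c][:10]]
-- ===== Notes on version B (the rewrite author's own statement) =====
-- stated objective: alternative
-- what changed: Replaces the single-pass dict-of-lists grouping with an index-first strategy: one pass collects distinct slugs in first-appearance order, then for each slug a scan over hits collects its first 10 matches, flattened into the output.
import Mathlib
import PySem

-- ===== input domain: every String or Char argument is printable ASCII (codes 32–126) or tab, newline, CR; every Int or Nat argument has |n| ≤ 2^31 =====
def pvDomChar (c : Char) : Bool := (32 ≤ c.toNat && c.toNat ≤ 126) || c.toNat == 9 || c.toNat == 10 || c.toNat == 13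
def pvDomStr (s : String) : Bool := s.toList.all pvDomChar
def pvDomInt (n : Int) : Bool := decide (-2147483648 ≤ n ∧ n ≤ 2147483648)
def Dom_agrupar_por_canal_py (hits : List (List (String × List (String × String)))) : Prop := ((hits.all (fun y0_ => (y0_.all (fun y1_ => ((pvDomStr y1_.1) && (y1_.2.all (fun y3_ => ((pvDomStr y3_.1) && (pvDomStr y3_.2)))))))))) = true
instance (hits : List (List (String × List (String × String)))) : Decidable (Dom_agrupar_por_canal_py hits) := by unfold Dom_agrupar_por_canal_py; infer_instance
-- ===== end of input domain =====

-- B restates A's dict-of-lists grouping as an index-first traversal: ordered distinct slugs, then first 10 matches per slug.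

-- ===== PORT A =====
-- hit.get("_source", {}).get("slug", "") — same extraction in both Pythons
def pvSlug (hit : List (String × List (String × String))) : String :=
  (PySem.Dict.mk ((PySem.Dict.mk hit).getD "_source" [])).getD "slug" ""

-- one iteration of A's grouping loop: ensure the key exists, then append if under the 10 cap
def pvStepA (d : PySem.Dict String (List (List (String × List (String × String)))))
    (hit : List (String × List (String × String))) :
    PySem.Dict String (List (List (String × List (String × String)))) :=
  let canal := pvSlug hit
  let d' := if d.contains canal then d else d.insert canal []
  if (d'.getD canal []).length < 10 then d'.modify canal [] (· ++ [hit]) else d'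

def agrupar_por_canal_py (hits : List (List (String × List (String × String)))) :
    List (List (String × List (String × String))) :=
  ((hits.foldl pvStepA PySem.Dict.empty).values).foldl (fun acc lista => acc ++ lista) []

-- ===== PORT B =====
def agrupar_por_canal_py_alt (hits : List (List (String × List (String × String)))) :
    List (List (String × List (String × String))) :=
  (hits.foldl (fun acc hit => if pvSlug hit ∈ acc then acc else acc ++ [pvSlug hit]) []).flatMap
    (fun c => (hits.filter (fun x => pvSlug x == c)).take 10)

-- ===== PRECONDITION & SPEC =====
def Spec_agrupar_por_canal_py (hits : List (List (String × List (String × String)))) (out : List (List (String × List (String × String)))) : Prop := out = agrupar_por_canal_py_alt hits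
instance (hits : List (List (String × List (String × String)))) (out : List (List (String × List (String × String)))) : Decidable (Spec_agrupar_por_canal_py hits out) := by unfold Spec_agrupar_por_canal_py; infer_instance

-- ===== CLAIM (what is proved, stated in full; the proofs are below) =====
def Claim_equal_agrupar_por_canal_py : Prop := ∀ (hits : List (List (String × List (String × String)))), Dom_agrupar_por_canal_py hits → Spec_agrupar_por_canal_py hits (agrupar_por_canal_py hits)

-- ===== LEMMAS AND PROOFS =====

-- ordered distinct slugs of a prefix (the fold B performs)
def pvOrden (p : List (List (String × List (String × String)))) : List String :=
  p.foldl (fun acc hit => if pvSlug hit ∈ acc then acc else acc ++ [pvSlug hit]) []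

lemma pvOrden_append (p : List (List (String × List (String × String)))) (h : List (String × List (String × String))) :
    pvOrden (p ++ [h]) =
      if pvSlug h ∈ pvOrden p then pvOrden p else pvOrden p ++ [pvSlug h] := by
  simp [pvOrden, List.foldl_append]

lemma pvStateA_append (p : List (List (String × List (String × String)))) (h : List (String × List (String × String))) :
    (p ++ [h]).foldl pvStepA PySem.Dict.empty = pvStepA (p.foldl pvStepA PySem.Dict.empty) h := by
  simp [List.foldl_append]

-- take-n cap grows exactly when fewer than n are collected
lemma take_append_singleton {α : Type} (xs : List α) (x : α) (n : Nat) :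
    (xs ++ [x]).take n = if xs.length < n then xs.take n ++ [x] else xs.take n := by
  split_ifs with h
  · rw [List.take_of_length_le (by simp; omega), List.take_of_length_le (by omega)]
  · rw [List.take_append_of_le_length (by omega)]

-- invariant of A's loop: keys = ordered distinct slugs, value = first 10 matches, keys nodup
lemma pvInvariant (p : List (List (String × List (String × String)))) :
    (p.foldl pvStepA PySem.Dict.empty).keys = pvOrden p ∧
    (p.foldl pvStepA PySem.Dict.empty).keys.Nodup ∧
    ∀ c, (p.foldl pvStepA PySem.Dict.empty).getD c [] =
      (p.filter (fun x => pvSlug x == c)).take 10 := by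
  induction p using List.reverseRecOn with
  | nil =>
    refine ⟨rfl, by simp [PySem.Dict.keys_empty], ?_⟩
    intro c; simp [PySem.Dict.getD_empty]
  | append_singleton p h ih =>
    obtain ⟨hk, hnd, hv⟩ := ih
    rw [pvStateA_append, pvOrden_append]
    set d := p.foldl pvStepA PySem.Dict.empty with hd
    set d' := if d.contains (pvSlug h) then d else d.insert (pvSlug h) [] with hd'
    have hcontains : d.contains (pvSlug h) = decide (pvSlug h ∈ pvOrden p) := by
      rw [PySem.Dict.contains_eq_decide_mem_keys, hk]
    have hstep : pvStepA d h =
        if (d'.getD (pvSlug h) []).length < 10 then d'.modify (pvSlug h) [] (· ++ [h]) else d' := rfl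
    have hct' : d'.contains (pvSlug h) = true := by
      rw [hd']
      by_cases hc : d.contains (pvSlug h)
      · rw [if_pos hc]; exact hc
      · rw [if_neg hc]; exact PySem.Dict.contains_insert_self d (pvSlug h) []
    have hk' : d'.keys = if pvSlug h ∈ pvOrden p then pvOrden p else pvOrden p ++ [pvSlug h] := by
      by_cases hm : pvSlug h ∈ pvOrden p
      · rw [hd', if_pos (by rw [hcontains]; simp [hm]), if_pos hm, hk]
      · rw [hd', if_neg (by rw [hcontains]; simp [hm]), if_neg hm,
          PySem.Dict.keys_insert_of_not_contains d [] (by rw [hcontains]; simp [hm]), hk]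
    have hndp : (pvOrden p).Nodup := hk ▸ hnd
    have hnd' : d'.keys.Nodup := by
      rw [hk']
      by_cases hm : pvSlug h ∈ pvOrden p
      · rw [if_pos hm]; exact hndp
      · rw [if_neg hm]
        exact List.Nodup.append hndp (List.nodup_singleton _)
          (List.disjoint_singleton.mpr hm)
    have hv' : ∀ c, d'.getD c [] = (p.filter (fun x => pvSlug x == c)).take 10 := by
      intro c
      rw [hd']
      by_cases hct : d.contains (pvSlug h)
      · rw [if_pos hct]; exact hv c
      · have hcf : d.contains (pvSlug h) = false := by simpa using hct
        rw [if_neg hct, PySem.Dict.getD_insert]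
        split_ifs with hce
        · subst hce
          rw [← hv (pvSlug h)]
          exact (PySem.Dict.getD_of_not_contains d _ hcf).symm
        · exact hv c
    have hlen10 : (d'.getD (pvSlug h) []).length =
        min 10 (p.filter (fun x => pvSlug x == pvSlug h)).length := by
      rw [hv' (pvSlug h), List.length_take]
    refine ⟨?_, ?_, ?_⟩
    · rw [hstep]
      by_cases hlen : (d'.getD (pvSlug h) []).length < 10
      · rw [if_pos hlen, PySem.Dict.keys_modify, PySem.Dict.keys_insert_of_contains d' _ hct', hk']
      · rw [if_neg hlen]; exact hk'
    · rw [hstep]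
      split_ifs with hlen
      · rw [PySem.Dict.keys_modify, PySem.Dict.keys_insert_of_contains d' _ hct']
        exact hnd'
      · exact hnd'
    · intro c
      by_cases hce : pvSlug h = c
      · subst hce
        have hfilt : (p ++ [h]).filter (fun x => pvSlug x == pvSlug h) =
            p.filter (fun x => pvSlug x == pvSlug h) ++ [h] := by
          simp [List.filter_append]
        rw [hstep, hfilt, take_append_singleton]
        split_ifs with h1 h2 h2
        · rw [PySem.Dict.getD_modify_self, hv' (pvSlug h)]
        · omega
        · omega
        · exact hv' (pvSlug h)
      · have hfilt : (p ++ [h]).filter (fun x => pvSlug x == c) =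
            p.filter (fun x => pvSlug x == c) := by
          simp [List.filter_append, hce]
        rw [hstep, hfilt]
        split_ifs with h1
        · rw [PySem.Dict.getD_modify_of_ne d' _ _ (fun hh => hce hh.symm)]
          exact hv' c
        · exact hv' c

-- ===== VERDICT (by name: the statement is the Claim_ definition above) =====
theorem agrupar_por_canal_py_spec : Claim_equal_agrupar_por_canal_py := by
  intro hits _
  unfold Spec_agrupar_por_canal_py agrupar_por_canal_py agrupar_por_canal_py_alt
  obtain ⟨hk, hnd, hv⟩ := pvInvariant hits
  rw [PySem.List.foldl_append_eq_flatMap (fun lista => lista), List.nil_append,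
    PySem.Dict.values_eq_map_keys _ hnd ([] : List (List (String × List (String × String)))), hk,
    funext hv]
  show ((pvOrden hits).map _).flatMap _ = (pvOrden hits).flatMap _
  simp [List.flatMap_map]
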